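-- pv_equiv track=rewrite | github.com/kyungminlee/fortran-migrator | src/pyengine/fortran_migrator.py | _segment_fixed_form_statements
-- ===== SOURCE A (Python) =====
-- def _segment_fixed_form_statements(
--     physical: list[str],
-- ) -> list[tuple[str, list[str], list[str], str]]:
--     """Group physical fixed-form lines into logical statements.
--
--     Each entry is ``(kind, lines, terminators, joined)`` where ``kind`` is
--     ``'blank' | 'comment' | 'pp' | 'code'``. ``lines`` and ``terminators``
--     are aligned slices of ``physical`` (text without newline / the
--     original line terminator). For ``'code'`` statements with continuation
--     lines, ``joined`` is the head plus each continuation's column-7+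
--     content concatenated with single spaces — this is what the per-line
--     transform passes operate on, so paren-walkers can match across the
--     physical line break. For other kinds, ``joined`` is the head text.
--     """
--     out: list[tuple[str, list[str], list[str], str]] = []
--     i = 0
--     while i < len(physical):
--         raw = physical[i]
--         if raw.endswith('\r\n'):
--             text, term = raw[:-2], '\r\n'
--         elif raw.endswith('\n') or raw.endswith('\r'):
--             text, term = raw[:-1], raw[-1]
--         else:
--             text, term = raw, ''
--         if not text.strip():
--             out.append(('blank', [text], [term], text))
--             i += 1
--             continue
--         if text[0] in 'Cc*!':
--             out.append(('comment', [text], [term], text))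
--             i += 1
--             continue
--         if text.lstrip().startswith('#'):
--             out.append(('pp', [text], [term], text))
--             i += 1
--             continue
--         # Code head — absorb any immediately-following continuation lines.
--         lines = [text]
--         terms = [term]
--         joined = text
--         j = i + 1
--         while j < len(physical):
--             nxt = physical[j]
--             if nxt.endswith('\r\n'):
--                 ntext, nterm = nxt[:-2], '\r\n'
--             elif nxt.endswith('\n') or nxt.endswith('\r'):
--                 ntext, nterm = nxt[:-1], nxt[-1]
--             else:
--                 ntext, nterm = nxt, ''
--             if (len(ntext) > 5 and ntext[:5].strip() == ''
--                     and ntext[5:6] not in (' ', '0', '\t', '')):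
--                 lines.append(ntext)
--                 terms.append(nterm)
--                 joined = joined + ' ' + ntext[6:]
--                 j += 1
--             else:
--                 break
--         out.append(('code', lines, terms, joined))
--         i = j
--     return out
-- ===== SOURCE B (Python) =====
-- def _split_term(raw):
--     if raw.endswith('\r\n'):
--         return raw[:-2], '\r\n'
--     if raw.endswith('\n') or raw.endswith('\r'):
--         return raw[:-1], raw[-1]
--     return raw, ''
--
--
-- def _segment_fixed_form_statements(
--     physical: list[str],
-- ) -> list[tuple[str, list[str], list[str], str]]:
--     """Single flat pass: extend the last 'code' entry on continuation-shaped
--     lines, otherwise classify and append a fresh entry."""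
--     out: list[tuple[str, list[str], list[str], str]] = []
--     for raw in physical:
--         text, term = _split_term(raw)
--         is_cont = (len(text) > 5 and text[:5].strip() == ''
--                    and text[5] not in ' 0\t')
--         if is_cont and out and out[-1][0] == 'code':
--             kind, lines, terms, joined = out[-1]
--             lines.append(text)
--             terms.append(term)
--             out[-1] = ('code', lines, terms, joined + ' ' + text[6:])
--         elif not text.strip():
--             out.append(('blank', [text], [term], text))
--         elif text[0] in 'Cc*!':
--             out.append(('comment', [text], [term], text))
--         elif text.lstrip().startswith('#'):
--             out.append(('pp', [text], [term], text))
--         else: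
--             out.append(('code', [text], [term], text))
--     return out
-- ===== Notes on version B (the rewrite author's own statement) =====
-- stated objective: alternative
-- what changed: Replaced A's nested outer/inner while loops with index juggling by a single flat fold that either extends the last appended 'code' entry on continuation-shaped lines or classifies and appends a fresh entry.
import Mathlib
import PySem

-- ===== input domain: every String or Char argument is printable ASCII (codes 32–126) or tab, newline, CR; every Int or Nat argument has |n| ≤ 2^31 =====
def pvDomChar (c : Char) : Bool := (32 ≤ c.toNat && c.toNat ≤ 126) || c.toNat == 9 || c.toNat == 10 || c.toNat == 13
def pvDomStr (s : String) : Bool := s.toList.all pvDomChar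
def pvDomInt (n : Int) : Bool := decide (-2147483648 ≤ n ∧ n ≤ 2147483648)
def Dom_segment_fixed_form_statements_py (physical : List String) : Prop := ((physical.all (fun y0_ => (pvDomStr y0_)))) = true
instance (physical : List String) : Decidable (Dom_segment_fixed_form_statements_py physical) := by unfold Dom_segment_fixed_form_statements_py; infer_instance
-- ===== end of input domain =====

-- B replaces A's nested outer/inner index loops by one flat fold that extends the last 'code' entry
-- on continuation-shaped lines (objective: alternative decomposition; mutation of A's local list only, no argument mutated).


-- ===== PORT A =====
-- line splitting (A's first three branches; raw[-1] on a nonempty string is its last char as a 1-char string — exact, the branch is guarded by endswith '\n'/'\r')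
def pvSplitA (raw : String) : String × String :=
  if PySem.Str.endswith raw "\r\n" then (PySem.Str.slice raw none (some (-2)), "\r\n")
  else if PySem.Str.endswith raw "\n" || PySem.Str.endswith raw "\r" then
    (PySem.Str.slice raw none (some (-1)),
     match PySem.Str.pyGet? raw (-1) with | some c => String.ofList [c] | none => "")
  else (raw, "")

-- text[0] in 'Cc*!' (guarded in A by text.strip() != '', so text is nonempty; none branch unreachable)
def pvIsCommentA (text : String) : Bool :=
  match PySem.Str.pyGet? text 0 with
  | some c => "Cc*!".toList.contains c
  | none => false

-- A's inner-while continuation test: len(ntext) > 5 and ntext[:5].strip() == '' and ntext[5:6] not in (' ', '0', '\t', '')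
def pvContA (ntext : String) : Bool :=
  decide (5 < PySem.Str.len ntext) &&
  (PySem.Str.strip (PySem.Str.slice ntext none (some 5)) == "") &&
  !([" ", "0", "\t", ""].contains (PySem.Str.slice ntext (some 5) (some 6)))

-- A's inner while loop: absorb continuation lines, returning (lines, terms, joined, remaining physical lines)
def pvAbsorbA : List String → List String → List String → String →
    (List String × List String × String × List String)
  | [], lines, terms, joined => (lines, terms, joined, [])
  | nxt :: rest, lines, terms, joined =>
    let p := pvSplitA nxt
    if pvContA p.1 then
      pvAbsorbA rest (lines ++ [p.1]) (terms ++ [p.2])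
        (joined ++ " " ++ PySem.Str.slice p.1 (some 6) none)
    else (lines, terms, joined, nxt :: rest)

theorem pvAbsorbA_len_le (rest : List String) : ∀ (lines terms : List String) (joined : String),
    (pvAbsorbA rest lines terms joined).2.2.2.length ≤ rest.length := by
  induction rest with
  | nil => intro _ _ _; simp [pvAbsorbA]
  | cons nxt r ih =>
    intro lines terms joined
    simp only [pvAbsorbA]
    split
    · exact Nat.le_succ_of_le (ih _ _ _)
    · simp

-- A's outer while loop (i advances to j after a code head)
def segment_fixed_form_statements_py : List String → List (String × List String × List String × String)
  | [] => []
  | raw :: rest =>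
    let p := pvSplitA raw
    if PySem.Str.strip p.1 == "" then
      ("blank", [p.1], [p.2], p.1) :: segment_fixed_form_statements_py rest
    else if pvIsCommentA p.1 then
      ("comment", [p.1], [p.2], p.1) :: segment_fixed_form_statements_py rest
    else if PySem.Str.startswith (PySem.Str.lstrip p.1) "#" then
      ("pp", [p.1], [p.2], p.1) :: segment_fixed_form_statements_py rest
    else
      let r := pvAbsorbA rest [p.1] [p.2] p.1
      ("code", r.1, r.2.1, r.2.2.1) :: segment_fixed_form_statements_py r.2.2.2
termination_by l => l.length
decreasing_by
  all_goals simp only [List.length_cons]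
  all_goals first
    | omega
    | (have := pvAbsorbA_len_le rest [(pvSplitA raw).1] [(pvSplitA raw).2] (pvSplitA raw).1
       omega)

-- ===== PORT B =====
-- Source B's _split_term helper (same three branches)
def pvSplitB (raw : String) : String × String :=
  if PySem.Str.endswith raw "\r\n" then (PySem.Str.slice raw none (some (-2)), "\r\n")
  else if PySem.Str.endswith raw "\n" || PySem.Str.endswith raw "\r" then
    (PySem.Str.slice raw none (some (-1)),
     match PySem.Str.pyGet? raw (-1) with | some c => String.ofList [c] | none => "")
  else (raw, "")

-- B's continuation test: len(text) > 5 and text[:5].strip() == '' and text[5] not in ' 0\t'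
def pvContB (text : String) : Bool :=
  decide (5 < PySem.Str.len text) &&
  (PySem.Str.strip (PySem.Str.slice text none (some 5)) == "") &&
  (match PySem.Str.pyGet? text 5 with
   | some c => !([' ', '0', '\t'].contains c)
   | none => false)

def pvIsCommentB (text : String) : Bool :=
  match PySem.Str.pyGet? text 0 with
  | some c => "Cc*!".toList.contains c
  | none => false

-- out[-1][0] == 'code'
def pvLastIsCode : List (String × List String × List String × String) → Bool
  | [] => false
  | [(k, _, _, _)] => k == "code"
  | _ :: t => pvLastIsCode t

-- the in-place update of out[-1] in Source B's extend branch
def pvExtendLast (out : List (String × List String × List String × String))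
    (text term : String) : List (String × List String × List String × String) :=
  match out with
  | [] => []
  | [(_, lines, terms, joined)] =>
      [("code", lines ++ [text], terms ++ [term],
        joined ++ " " ++ PySem.Str.slice text (some 6) none)]
  | e :: t => e :: pvExtendLast t text term

-- Source B's loop body
def pvStepB (out : List (String × List String × List String × String)) (raw : String) :
    List (String × List String × List String × String) :=
  let p := pvSplitB raw
  if pvContB p.1 && !out.isEmpty && pvLastIsCode out then
    pvExtendLast out p.1 p.2
  else if PySem.Str.strip p.1 == "" then
    out ++ [("blank", [p.1], [p.2], p.1)]
  else if pvIsCommentB p.1 then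
    out ++ [("comment", [p.1], [p.2], p.1)]
  else if PySem.Str.startswith (PySem.Str.lstrip p.1) "#" then
    out ++ [("pp", [p.1], [p.2], p.1)]
  else
    out ++ [("code", [p.1], [p.2], p.1)]

def segment_fixed_form_statements_py_alt (physical : List String) :
    List (String × List String × List String × String) :=
  physical.foldl pvStepB []

-- ===== PRECONDITION & SPEC =====
def Spec_segment_fixed_form_statements_py (physical : List String) (out : List (String × List String × List String × String)) : Prop := out = segment_fixed_form_statements_py_alt physical
instance (physical : List String) (out : List (String × List String × List String × String)) : Decidable (Spec_segment_fixed_form_statements_py physical out) := by unfold Spec_segment_fixed_form_statements_py; infer_instance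

-- ===== CLAIM (what is proved, stated in full; the proofs are below) =====
def Claim_equal_segment_fixed_form_statements_py : Prop := ∀ (physical : List String), Dom_segment_fixed_form_statements_py physical → Spec_segment_fixed_form_statements_py physical (segment_fixed_form_statements_py physical)

-- ===== LEMMAS AND PROOFS =====

theorem pvSplitB_eq (raw : String) : pvSplitB raw = pvSplitA raw := rfl

theorem pvIsCommentB_eq (t : String) : pvIsCommentB t = pvIsCommentA t := rfl

theorem pvOfListBeq (l : List Char) (s : String) : (String.ofList l == s) = (l == s.toList) := by
  rw [Bool.eq_iff_iff]
  simp only [beq_iff_eq]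
  constructor
  · intro h; rw [← h, String.toList_ofList]
  · intro h; rw [h, String.ofList_toList]

-- the two continuation tests agree (A looks at the slice text[5:6], B at the character text[5])
theorem pvCont_eq (t : String) : pvContB t = pvContA t := by
  unfold pvContA pvContB
  by_cases h5 : 5 < PySem.Str.len t
  · have hl : 5 < t.toList.length := by rw [PySem.Str.len_eq] at h5; exact_mod_cast h5
    have hget : PySem.Str.pyGet? t 5 = t.toList[5]? := by simp [pysem]
    have hslice : PySem.Str.slice t (some 5) (some 6) = String.ofList [t.toList[5]] := by
      simp only [PySem.Str.slice, PySem.Chars.slice_eq_listSlice]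
      rw [show ((5:Int)) = ((5:Nat):Int) by norm_num, show ((6:Int)) = ((6:Nat):Int) by norm_num,
        PySem.List.slice_natCast, List.take_one, List.head?_drop]
      simp [List.getElem?_eq_getElem hl]
    rw [hget, hslice, List.getElem?_eq_getElem hl]
    congr 1
    simp only [List.contains_cons, List.contains_nil, pvOfListBeq]
    have h1 : (" " : String).toList = [' '] := by decide
    have h2 : ("0" : String).toList = ['0'] := by decide
    have h3 : ("\t" : String).toList = ['\t'] := by decide
    have h4 : ("" : String).toList = [] := by decide
    rw [h1, h2, h3, h4]
    cases t.toList[5] with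
    | mk v hv => simp
  · have h5' : decide (5 < PySem.Str.len t) = false := by simpa using h5
    rw [h5']; simp only [Bool.false_and]

theorem pvLastIsCode_append (acc : List (String × List String × List String × String))
    (e : String × List String × List String × String) :
    pvLastIsCode (acc ++ [e]) = (e.1 == "code") := by
  induction acc with
  | nil => rcases e with ⟨k, l, t, j⟩; rfl
  | cons x acc ih =>
    cases acc with
    | nil => rcases e with ⟨k, l, t, j⟩; simp [pvLastIsCode]
    | cons y acc' => simpa [pvLastIsCode] using ih

theorem pvExtendLast_append (acc : List (String × List String × List String × String))
    (k : String) (lines terms : List String) (joined text term : String) :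
    pvExtendLast (acc ++ [(k, lines, terms, joined)]) text term =
      acc ++ [("code", lines ++ [text], terms ++ [term],
        joined ++ " " ++ PySem.Str.slice text (some 6) none)] := by
  induction acc with
  | nil => rfl
  | cons x acc ih =>
    cases acc with
    | nil => simp [pvExtendLast]
    | cons y acc' => simpa [pvExtendLast] using ih

-- B's fold over a tail of physical lines, starting from an accumulator ending in a code entry,
-- performs exactly A's absorb loop on that entry
theorem pvFold_absorb (rest : List String) : ∀ (acc : List (String × List String × List String × String))
    (lines terms : List String) (joined : String),
    List.foldl pvStepB (acc ++ [("code", lines, terms, joined)]) rest =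
      List.foldl pvStepB
        (acc ++ [("code", (pvAbsorbA rest lines terms joined).1,
                  (pvAbsorbA rest lines terms joined).2.1,
                  (pvAbsorbA rest lines terms joined).2.2.1)])
        (pvAbsorbA rest lines terms joined).2.2.2 := by
  induction rest with
  | nil => intro acc lines terms joined; simp [pvAbsorbA]
  | cons nxt r ih =>
    intro acc lines terms joined
    by_cases hc : pvContA (pvSplitA nxt).1
    · have hstep : pvStepB (acc ++ [("code", lines, terms, joined)]) nxt =
          acc ++ [("code", lines ++ [(pvSplitA nxt).1], terms ++ [(pvSplitA nxt).2],
            joined ++ " " ++ PySem.Str.slice (pvSplitA nxt).1 (some 6) none)] := by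
        have hne : (acc ++ [(("code":String), lines, terms, joined)]).isEmpty = false := by
          simp
        simp only [pvStepB, pvSplitB_eq, pvCont_eq, hc, pvLastIsCode_append, hne]
        simp [pvExtendLast_append]
      simp only [List.foldl_cons, hstep, pvAbsorbA, hc, if_pos]
      exact ih _ _ _ _
    · simp only [pvAbsorbA]
      rw [if_neg hc]

-- after A's absorb loop stops, the next physical line (if any) is not continuation-shaped
theorem pvAbsorbA_head_not_cont (rest : List String) : ∀ (lines terms : List String) (joined : String),
    match (pvAbsorbA rest lines terms joined).2.2.2 with
    | [] => True
    | nxt :: _ => pvContA (pvSplitA nxt).1 = false := by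
  induction rest with
  | nil => intro _ _ _; simp [pvAbsorbA]
  | cons nxt r ih =>
    intro lines terms joined
    simp only [pvAbsorbA]
    by_cases hc : pvContA (pvSplitA nxt).1
    · rw [if_pos hc]; exact ih _ _ _
    · rw [if_neg hc]; simpa using hc

-- main induction: B's fold from any accumulator that cannot capture the next line equals acc ++ A's output
theorem pvMain (n : Nat) : ∀ (physical : List String), physical.length ≤ n →
    ∀ (acc : List (String × List String × List String × String)),
    ((match physical with
      | [] => True
      | raw :: _ => pvContA (pvSplitA raw).1 = false) ∨ pvLastIsCode acc = false) →
    List.foldl pvStepB acc physical = acc ++ segment_fixed_form_statements_py physical := by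
  induction n with
  | zero =>
    intro physical hlen acc _
    have : physical = [] := List.eq_nil_of_length_eq_zero (Nat.le_zero.mp hlen)
    subst this; simp [segment_fixed_form_statements_py]
  | succ n ih =>
    intro physical hlen acc hok
    cases physical with
    | nil => simp [segment_fixed_form_statements_py]
    | cons raw rest =>
      have hguard : (pvContB (pvSplitA raw).1 && !acc.isEmpty && pvLastIsCode acc) = false := by
        rw [pvCont_eq]
        rcases hok with h | h
        · have h' : pvContA (pvSplitA raw).1 = false := h
          rw [h', Bool.false_and, Bool.false_and]
        · rw [h, Bool.and_false]
      have hng : ¬((pvContB (pvSplitA raw).1 && !acc.isEmpty && pvLastIsCode acc) = true) := by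
        rw [hguard]; exact Bool.false_ne_true
      have hlen' : rest.length ≤ n := by simpa using hlen
      simp only [List.foldl_cons]
      by_cases hb : (PySem.Str.strip (pvSplitA raw).1 == "") = true
      · have hstep : pvStepB acc raw = acc ++ [("blank", [(pvSplitA raw).1], [(pvSplitA raw).2], (pvSplitA raw).1)] := by
          simp only [pvStepB, pvSplitB_eq]
          rw [if_neg hng, if_pos hb]
        rw [hstep, ih rest hlen' _ (Or.inr (by simp [pvLastIsCode_append]))]
        simp only [segment_fixed_form_statements_py]
        rw [if_pos hb, List.append_assoc, List.singleton_append]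
      · by_cases hcm : pvIsCommentA (pvSplitA raw).1 = true
        · have hstep : pvStepB acc raw = acc ++ [("comment", [(pvSplitA raw).1], [(pvSplitA raw).2], (pvSplitA raw).1)] := by
            simp only [pvStepB, pvSplitB_eq, pvIsCommentB_eq]
            rw [if_neg hng, if_neg hb, if_pos hcm]
          rw [hstep, ih rest hlen' _ (Or.inr (by simp [pvLastIsCode_append]))]
          simp only [segment_fixed_form_statements_py]
          rw [if_neg hb, if_pos hcm, List.append_assoc, List.singleton_append]
        · by_cases hpp : (PySem.Str.startswith (PySem.Str.lstrip (pvSplitA raw).1) "#") = true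
          · have hstep : pvStepB acc raw = acc ++ [("pp", [(pvSplitA raw).1], [(pvSplitA raw).2], (pvSplitA raw).1)] := by
              simp only [pvStepB, pvSplitB_eq, pvIsCommentB_eq]
              rw [if_neg hng, if_neg hb, if_neg hcm, if_pos hpp]
            rw [hstep, ih rest hlen' _ (Or.inr (by simp [pvLastIsCode_append]))]
            simp only [segment_fixed_form_statements_py]
            rw [if_neg hb, if_neg hcm, if_pos hpp, List.append_assoc, List.singleton_append]
          · -- code head: B appends a fresh code entry, then the fold performs A's absorb loop
            have hstep : pvStepB acc raw = acc ++ [("code", [(pvSplitA raw).1], [(pvSplitA raw).2], (pvSplitA raw).1)] := by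
              simp only [pvStepB, pvSplitB_eq, pvIsCommentB_eq]
              rw [if_neg hng, if_neg hb, if_neg hcm, if_neg hpp]
            rw [hstep, pvFold_absorb]
            have hrest' := pvAbsorbA_head_not_cont rest [(pvSplitA raw).1] [(pvSplitA raw).2] (pvSplitA raw).1
            have hlen'' : (pvAbsorbA rest [(pvSplitA raw).1] [(pvSplitA raw).2] (pvSplitA raw).1).2.2.2.length ≤ n := by
              have := pvAbsorbA_len_le rest [(pvSplitA raw).1] [(pvSplitA raw).2] (pvSplitA raw).1
              omega
            rw [ih _ hlen'' _ (Or.inl (by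
              revert hrest'
              cases (pvAbsorbA rest [(pvSplitA raw).1] [(pvSplitA raw).2] (pvSplitA raw).1).2.2.2 with
              | nil => intro _; trivial
              | cons x t => intro h; exact h))]
            conv_rhs => rw [segment_fixed_form_statements_py]
            rw [if_neg hb, if_neg hcm, if_neg hpp, List.append_assoc, List.singleton_append]

-- ===== VERDICT (by name: the statement is the Claim_ definition above) =====
theorem segment_fixed_form_statements_py_spec : Claim_equal_segment_fixed_form_statements_py := by
  intro physical _
  unfold Spec_segment_fixed_form_statements_py segment_fixed_form_statements_py_alt
  have := pvMain physical.length physical (le_refl _) []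
    (by cases physical with | nil => exact Or.inl trivial | cons a b => exact Or.inr rfl)
  simpa using this.symm
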